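-- pv_equiv track=rewrite | github.com/Zeynep012/VetKayit | mainA.py | uzanti_bul
-- ===== SOURCE A (Python) =====
-- def uzanti_bul(dosya):
--     #bu dosya yolunun sonundaki dosyanin uzantisini ayiran dongu
--     k = 0
--     kntrl = False
--     uzanti = []
--     for i,parca in enumerate(dosya):
--         if parca == '.' or kntrl == True:
--             kntrl = True
--             uzanti.insert(k,dosya[i])
--             k += 1
--     return uzanti
-- ===== SOURCE B (Python) =====
-- def uzanti_bul(dosya):
--     # find the first '.' up front, then slice the suffix off in one go
--     idx = dosya.find('.')
--     if idx != -1: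
--         return list(dosya[idx:])
--     return []
-- ===== Notes on version B (the rewrite author's own statement) =====
-- stated objective: simpler
-- what changed: Replaces the flag-driven accumulating loop (enumerate + per-char list.insert with a manual counter) by locating the split point once with str.find and returning the suffix as a single slice.
import Mathlib
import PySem

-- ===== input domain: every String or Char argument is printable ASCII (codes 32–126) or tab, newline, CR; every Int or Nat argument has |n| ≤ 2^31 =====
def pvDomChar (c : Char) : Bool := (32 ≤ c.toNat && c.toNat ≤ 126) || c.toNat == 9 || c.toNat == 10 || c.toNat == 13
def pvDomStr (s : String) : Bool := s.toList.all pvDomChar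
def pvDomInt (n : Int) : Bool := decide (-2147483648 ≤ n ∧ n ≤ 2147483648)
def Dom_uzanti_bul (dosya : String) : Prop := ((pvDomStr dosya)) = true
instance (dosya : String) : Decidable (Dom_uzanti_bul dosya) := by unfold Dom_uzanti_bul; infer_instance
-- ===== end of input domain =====

-- B replaces A's flag-driven accumulating loop by find-the-first-dot then one slice (simpler).

-- ===== PORT A =====
-- loop body of A; state = (k, kntrl, uzanti); dosya[i] is exactly parca here (i is parca's index), ported as p.2
def uzStep (st : Int × Bool × List String) (p : Int × Char) : Int × Bool × List String :=
  if p.2 = '.' || st.2.1 then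
    (st.1 + 1, true, PySem.List.insert st.2.2 st.1 (String.ofList [p.2]))
  else st

def uzanti_bul (dosya : String) : List String :=
  ((PySem.List.enumerate dosya.toList 0).foldl uzStep ((0 : Int), false, ([] : List String))).2.2

-- ===== PORT B =====
-- B: idx = dosya.find('.'); list(dosya[idx:]) if idx != -1 else []
-- (the string slice turned into a list of 1-char strings = slice the char list, map to singleton strings — exact)
def uzanti_bul_alt (dosya : String) : List String :=
  let idx := PySem.Str.find dosya "."
  if idx ≠ -1 then (PySem.List.slice dosya.toList (some idx) none).map (fun c => String.ofList [c])
  else []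

-- ===== PRECONDITION & SPEC =====
def Spec_uzanti_bul (dosya : String) (out : List String) : Prop := out = uzanti_bul_alt dosya
instance (dosya : String) (out : List String) : Decidable (Spec_uzanti_bul dosya out) := by unfold Spec_uzanti_bul; infer_instance

-- ===== CLAIM (what is proved, stated in full; the proofs are below) =====
def Claim_equal_uzanti_bul : Prop := ∀ (dosya : String), Dom_uzanti_bul dosya → Spec_uzanti_bul dosya (uzanti_bul dosya)

-- ===== LEMMAS AND PROOFS =====

-- the enumerate index is never read by uzStep, so the fold over enumerate is a fold over the chars
theorem uz_enum_foldl (cs : List Char) (s : Int) (st : Int × Bool × List String) :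
    (PySem.List.enumerate cs s).foldl uzStep st = cs.foldl (fun st c => uzStep st (0, c)) st := by
  induction cs generalizing s st with
  | nil => rfl
  | cons c t ih =>
      rw [PySem.List.enumerate_cons]
      simp only [List.foldl_cons]
      exact ih (s + 1) _

-- once kntrl is true and k = len(uzanti), every remaining char is appended
theorem uz_loopTrue (cs : List Char) (uz : List String) :
    cs.foldl (fun st c => uzStep st (0, c)) ((uz.length : Int), true, uz)
      = ((uz.length : Int) + cs.length, true, uz ++ cs.map (fun c => String.ofList [c])) := by
  induction cs generalizing uz with
  | nil => simp
  | cons c t ih =>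
      simp only [List.foldl_cons]
      have hins : PySem.List.insert uz ((uz.length : Int)) (String.ofList [c])
          = uz ++ [String.ofList [c]] := PySem.List.insert_len uz _
      have hstep : uzStep ((uz.length : Int), true, uz) (0, c)
          = (((uz ++ [String.ofList [c]]).length : Int), true, uz ++ [String.ofList [c]]) := by
        simp [uzStep, hins]
      rw [hstep, ih]
      simp [List.append_assoc]
      omega

-- closed form for the find-loop with the single-char needle '.'
theorem uz_go_char (t : List Char) (k : Nat) :
    PySem.Chars.find.go ['.'] t k
      = if '.' ∈ t then ((k + t.idxOf '.' : Nat) : Int) else -1 := by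
  induction t generalizing k with
  | nil => simp [PySem.Chars.find.go]
  | cons c t ih =>
      by_cases hc : c = '.'
      · subst hc
        simp [PySem.Chars.find.go, List.isPrefixOf]
      · rw [PySem.Chars.find.go]
        have hpre : ['.'].isPrefixOf (c :: t) = false := by
          simp [List.isPrefixOf]; exact Ne.symm hc
        rw [hpre]
        simp only [Bool.false_eq_true, if_false]
        rw [ih]
        rw [List.idxOf_cons_ne t hc]
        by_cases hm : '.' ∈ t
        · simp [hm, Ne.symm hc]
          omega
        · simp [hm, Ne.symm hc]

-- A's whole loop: everything from the first '.' on, mapped to 1-char strings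
theorem uz_loopFalse (cs : List Char) :
    (cs.foldl (fun st c => uzStep st (0, c)) ((0 : Int), false, ([] : List String))).2.2
      = if '.' ∈ cs then (cs.drop (cs.idxOf '.')).map (fun c => String.ofList [c]) else [] := by
  induction cs with
  | nil => simp
  | cons c t ih =>
      by_cases hc : c = '.'
      · subst hc
        simp only [List.foldl_cons]
        have hstep : uzStep ((0 : Int), false, ([] : List String)) (0, '.')
            = ((1 : Int), true, [String.ofList ['.']]) := by
          simp [uzStep, PySem.List.insert_zero]
        rw [hstep]
        have h1 : ((1 : Int), true, [String.ofList ['.']])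
            = ((([String.ofList ['.']] : List String).length : Int), true, [String.ofList ['.']]) := by
          simp
        rw [h1, uz_loopTrue]
        simp
      · simp only [List.foldl_cons]
        have hstep : uzStep ((0 : Int), false, ([] : List String)) (0, c)
            = ((0 : Int), false, ([] : List String)) := by
          simp [uzStep, hc]
        rw [hstep, ih]
        rw [List.idxOf_cons_ne t hc]
        by_cases hm : '.' ∈ t
        · simp [hm, Ne.symm hc]
        · simp [hm, Ne.symm hc]

-- ===== VERDICT (by name: the statement is the Claim_ definition above) =====
theorem uzanti_bul_spec : Claim_equal_uzanti_bul := by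
  intro dosya _
  unfold Spec_uzanti_bul uzanti_bul uzanti_bul_alt
  rw [uz_enum_foldl, uz_loopFalse]
  have hsf : PySem.Str.find dosya "." = PySem.Chars.find.go ['.'] dosya.toList 0 := rfl
  rw [hsf, uz_go_char]
  by_cases hm : '.' ∈ dosya.toList
  · have hne : ((0 + dosya.toList.idxOf '.' : Nat) : Int) ≠ -1 := by omega
    simp only [hm, if_true, ne_eq, hne, not_false_iff]
    rw [PySem.List.slice_from_natCast]
    simp
  · simp [hm]
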